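-- pv_equiv track=rewrite | github.com/critical88/SmellBench | analyzer.py | _collect_family_classes
-- ===== SOURCE A (Python) =====
-- from collections import defaultdict
--
-- def _collect_family_classes(all_class_parent):
--     """
--     Return each class's inheritance family as sets of related classes.
--     """
--     family_classes = defaultdict(set)
--
--     class_graph = defaultdict(set)
--
--     for class_key, parents in all_class_parent.items():
--         class_graph.setdefault(class_key, set())
--         for parent_key in parents:
--             class_graph.setdefault(parent_key, set())
--             class_graph[class_key].add(parent_key)
--             class_graph[parent_key].add(class_key)
--
--     visited = set()
--     for class_key in class_graph.keys():
--         if class_key in visited: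
--             continue
--         component = set()
--         stack = [class_key]
--         while stack:
--             current = stack.pop()
--             if current in visited:
--                 continue
--             visited.add(current)
--             component.add(current)
--             for neighbor in class_graph[current]:
--                 if neighbor not in visited:
--                     stack.append(neighbor)
--
--         for comp_class in component:
--             family_classes[comp_class].update(component)
--
--     return family_classes
-- ===== SOURCE B (Python) =====
-- from collections import defaultdict
--
-- def _collect_family_classes(all_class_parent):
--     """
--     Same families, computed by union-find (quick-find variant) instead of
--     graph + DFS: label[x] is the current representative of x's class; each
--     (class, parent) edge unions the two classes by relabeling one of them;
--     the families are then read off by grouping nodes by their final label.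
--     """
--     label = {}
--     for class_key, parents in all_class_parent.items():
--         label.setdefault(class_key, class_key)
--         for parent_key in parents:
--             label.setdefault(parent_key, parent_key)
--             a = label[class_key]
--             b = label[parent_key]
--             if a != b:
--                 for node, lab in list(label.items()):
--                     if lab == b:
--                         label[node] = a
--
--     groups = {}
--     for node, lab in label.items():
--         groups.setdefault(lab, []).append(node)
--
--     family_classes = defaultdict(set)
--     for members in groups.values():
--         for m in members:
--             family_classes[m] = set(members)
--     return family_classes
-- ===== Notes on version B (the rewrite author's own statement) =====
-- stated objective: alternative
-- what changed: Replaces A's explicit adjacency graph + stack DFS component search with a quick-find union-find: a label map unions each (class, parent) edge by eagerly relabeling one class, and the families are read off by grouping nodes by their final label; no graph and no traversal are built.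
import Mathlib
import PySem

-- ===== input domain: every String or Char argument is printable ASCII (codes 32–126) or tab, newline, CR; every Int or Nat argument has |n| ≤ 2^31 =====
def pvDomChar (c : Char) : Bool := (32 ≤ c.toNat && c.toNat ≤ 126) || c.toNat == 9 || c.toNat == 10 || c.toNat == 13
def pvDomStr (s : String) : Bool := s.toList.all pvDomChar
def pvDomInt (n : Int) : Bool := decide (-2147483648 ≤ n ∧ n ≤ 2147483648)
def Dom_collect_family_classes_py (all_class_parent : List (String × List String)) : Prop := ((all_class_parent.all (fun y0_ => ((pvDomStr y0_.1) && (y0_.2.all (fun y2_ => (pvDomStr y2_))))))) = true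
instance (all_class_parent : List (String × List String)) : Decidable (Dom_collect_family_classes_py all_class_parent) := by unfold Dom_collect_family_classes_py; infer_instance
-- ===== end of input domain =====

-- B replaces A's adjacency graph + stack DFS with a quick-find union-find (a label map,
-- eagerly relabeled on each union) and reads the families off by grouping nodes by final
-- label (objective: alternative, not faster). In both ports the iteration over Python
-- SETS that only feeds an order-insensitive dict result is modeled in graph-key order
-- (Python's set iteration order is unspecified); loops carry an explicit fuel argument
-- proved large enough for every input.

-- ===== PORT A =====
-- class_graph: defaultdict(set); setdefault + set.add, exactly A's construction order
def pvGraphA (all_class_parent : List (String × List String)) : PySem.Dict String (PySem.Set String) :=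
  all_class_parent.foldl (fun g kp =>
    let g := g.setdefault kp.1 PySem.Set.empty
    kp.2.foldl (fun g pk =>
      let g := g.setdefault pk PySem.Set.empty
      let g := g.modify kp.1 PySem.Set.empty (fun s => PySem.Set.add s pk)
      g.modify pk PySem.Set.empty (fun s => PySem.Set.add s kp.1)) g) PySem.Dict.empty

-- fuel bound for the while loop: 1 + #nodes + #(directed edges) ≥ number of iterations
def pvFuelA (g : PySem.Dict String (PySem.Set String)) : Nat :=
  1 + g.items.length + (g.items.map (fun p => p.2.length)).sum

-- the 'while stack:' loop; stack top at the head
def pvLoopA (g : PySem.Dict String (PySem.Set String)) :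
    Nat → List String → PySem.Set String → PySem.Set String → PySem.Set String × PySem.Set String
  | 0, _, visited, component => (visited, component)
  | _ + 1, [], visited, component => (visited, component)
  | fuel + 1, current :: stack, visited, component =>
    if PySem.Set.contains visited current then pvLoopA g fuel stack visited component
    else
      let visited' := PySem.Set.add visited current
      let component' := PySem.Set.add component current
      let stack' := (g.getD current PySem.Set.empty).foldl
        (fun s n => if PySem.Set.contains visited' n then s else n :: s) stack
      pvLoopA g fuel stack' visited' component'

def collect_family_classes_py (all_class_parent : List (String × List String)) : List (String × List String) :=
  let class_graph := pvGraphA all_class_parent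
  let res := class_graph.keys.foldl
    (fun (acc : PySem.Set String × PySem.Dict String (PySem.Set String)) class_key =>
      if PySem.Set.contains acc.1 class_key then acc
      else
        let r := pvLoopA class_graph (pvFuelA class_graph) [class_key] acc.1 PySem.Set.empty
        -- 'for comp_class in component: family_classes[comp_class].update(component)':
        -- Python iterates the SET component twice here; its iteration order is unspecified
        -- (hash order) and only feeds an order-insensitive dict-of-sets, so the set is
        -- enumerated deterministically in graph-key order
        let comp := class_graph.keys.filter (fun x => PySem.Set.contains r.2 x)
        (r.1, comp.foldl (fun fam m =>
          fam.modify m PySem.Set.empty (fun s => PySem.Set.update s comp)) acc.2))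
    (PySem.Set.empty, PySem.Dict.empty)
  res.2.items

-- ===== PORT B =====
-- 'for node, lab in list(label.items()): if lab == b: label[node] = a'
def pvUnionFold (b a : String) (ps : List (String × String)) (d : PySem.Dict String String) :
    PySem.Dict String String :=
  ps.foldl (fun d p => if p.2 == b then d.insert p.1 a else d) d

-- the quick-find label map: every (class, parent) edge unions the two classes
def pvLabels (l : List (String × List String)) : PySem.Dict String String :=
  l.foldl (fun label kp =>
    let label := label.setdefault kp.1 kp.1
    kp.2.foldl (fun label pk =>
      let label := label.setdefault pk pk
      let a := label.getD kp.1 ""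
      let b := label.getD pk ""
      if a ≠ b then pvUnionFold b a label.items label else label) label) PySem.Dict.empty

def collect_family_classes_py_alt (all_class_parent : List (String × List String)) : List (String × List String) :=
  let label := pvLabels all_class_parent
  let groups := label.items.foldl
    (fun (gr : PySem.Dict String (List String)) p => gr.modify p.2 [] (fun ms => ms ++ [p.1]))
    PySem.Dict.empty
  let fam := groups.values.foldl
    (fun (fam : PySem.Dict String (PySem.Set String)) members =>
      members.foldl (fun fam m => fam.insert m (PySem.Set.ofList members)) fam)
    PySem.Dict.empty
  fam.items

-- ===== PRECONDITION & SPEC =====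
def Spec_collect_family_classes_py (all_class_parent : List (String × List String)) (out : List (String × List String)) : Prop := out = collect_family_classes_py_alt all_class_parent
instance (all_class_parent : List (String × List String)) (out : List (String × List String)) : Decidable (Spec_collect_family_classes_py all_class_parent out) := by unfold Spec_collect_family_classes_py; infer_instance

-- ===== CLAIM (what is proved, stated in full; the proofs are below) =====
def Claim_equal_collect_family_classes_py : Prop := ∀ (all_class_parent : List (String × List String)), Dom_collect_family_classes_py all_class_parent → Spec_collect_family_classes_py all_class_parent (collect_family_classes_py all_class_parent)

-- ===== LEMMAS AND PROOFS =====

-- ---------- the adjacency relation of A's graph and generic EqvGen tools ----------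

def pvAdj (g : PySem.Dict String (PySem.Set String)) (x y : String) : Prop :=
  y ∈ g.getD x PySem.Set.empty

theorem pvEqvGen_mono {α : Type} {r s : α → α → Prop}
    (h : ∀ a b, r a b → Relation.EqvGen s a b) {x y : α}
    (hxy : Relation.EqvGen r x y) : Relation.EqvGen s x y := by
  induction hxy with
  | rel a b hab => exact h a b hab
  | refl a => exact Relation.EqvGen.refl a
  | symm a b _ ih => exact Relation.EqvGen.symm a b ih
  | trans a b c _ _ ih1 ih2 => exact Relation.EqvGen.trans a b c ih1 ih2

theorem pvEqvGen_iff_of_iff {α : Type} {r s : α → α → Prop}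
    (h : ∀ a b, r a b ↔ s a b) (x y : α) :
    Relation.EqvGen r x y ↔ Relation.EqvGen s x y := by
  constructor
  · exact fun hh => pvEqvGen_mono (fun a b hab => Relation.EqvGen.rel a b ((h a b).mp hab)) hh
  · exact fun hh => pvEqvGen_mono (fun a b hab => Relation.EqvGen.rel a b ((h a b).mpr hab)) hh

-- adding one pair (u, v) to a relation: the classes of u and v merge
theorem pvEqvGen_ext {α : Type} (r : α → α → Prop) (u v : α) :
    ∀ x y, Relation.EqvGen (fun a b => r a b ∨ (a = u ∧ b = v)) x y ↔
      (Relation.EqvGen r x y ∨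
        (Relation.EqvGen r x u ∧ Relation.EqvGen r v y) ∨
        (Relation.EqvGen r x v ∧ Relation.EqvGen r u y)) := by
  intro x y
  constructor
  · intro h
    induction h with
    | rel a b hab =>
      rcases hab with hab | ⟨ha, hb⟩
      · exact Or.inl (Relation.EqvGen.rel a b hab)
      · refine Or.inr (Or.inl ⟨?_, ?_⟩)
        · rw [ha]; exact Relation.EqvGen.refl u
        · rw [hb]; exact Relation.EqvGen.refl v
    | refl a => exact Or.inl (Relation.EqvGen.refl a)
    | symm a b _ ih =>
      rcases ih with h1 | ⟨h1, h2⟩ | ⟨h1, h2⟩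
      · exact Or.inl (Relation.EqvGen.symm a b h1)
      · exact Or.inr (Or.inr ⟨Relation.EqvGen.symm _ _ h2, Relation.EqvGen.symm _ _ h1⟩)
      · exact Or.inr (Or.inl ⟨Relation.EqvGen.symm _ _ h2, Relation.EqvGen.symm _ _ h1⟩)
    | trans a b c _ _ ih1 ih2 =>
      rcases ih1 with h1 | ⟨h1, h2⟩ | ⟨h1, h2⟩ <;>
        rcases ih2 with h3 | ⟨h3, h4⟩ | ⟨h3, h4⟩
      · exact Or.inl (h1.trans _ _ _ h3)
      · exact Or.inr (Or.inl ⟨h1.trans _ _ _ h3, h4⟩)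
      · exact Or.inr (Or.inr ⟨h1.trans _ _ _ h3, h4⟩)
      · exact Or.inr (Or.inl ⟨h1, h2.trans _ _ _ h3⟩)
      · exact Or.inr (Or.inl ⟨h1, h4⟩)
      · exact Or.inl (h1.trans _ _ _ h4)
      · exact Or.inr (Or.inr ⟨h1, h2.trans _ _ _ h3⟩)
      · exact Or.inl (h1.trans _ _ _ h4)
      · exact Or.inr (Or.inr ⟨h1, h4⟩)
  · intro h
    have hmono : ∀ a b, Relation.EqvGen r a b →
        Relation.EqvGen (fun a b => r a b ∨ (a = u ∧ b = v)) a b :=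
      fun a b hab => pvEqvGen_mono (fun c d hcd => Relation.EqvGen.rel c d (Or.inl hcd)) hab
    have huv : Relation.EqvGen (fun a b => r a b ∨ (a = u ∧ b = v)) u v :=
      Relation.EqvGen.rel u v (Or.inr ⟨rfl, rfl⟩)
    rcases h with h1 | ⟨h1, h2⟩ | ⟨h1, h2⟩
    · exact hmono _ _ h1
    · exact ((hmono _ _ h1).trans _ _ _ huv).trans _ _ _ (hmono _ _ h2)
    · exact ((hmono _ _ h1).trans _ _ _ (huv.symm _ _)).trans _ _ _ (hmono _ _ h2)

-- a node no pair touches is related only to itself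
theorem pvEqvGen_ne {α : Type} (r : α → α → Prop) (k : α)
    (h : ∀ a b, r a b → a ≠ k ∧ b ≠ k) :
    ∀ x y, Relation.EqvGen r x y → x = y ∨ (x ≠ k ∧ y ≠ k) := by
  intro x y hxy
  induction hxy with
  | rel a b hab => exact Or.inr (h a b hab)
  | refl a => exact Or.inl rfl
  | symm a b _ ih => rcases ih with h1 | ⟨h1, h2⟩
                     · exact Or.inl h1.symm
                     · exact Or.inr ⟨h2, h1⟩
  | trans a b c _ _ ih1 ih2 =>
    rcases ih1 with h1 | ⟨h1, h2⟩ <;> rcases ih2 with h3 | ⟨h3, h4⟩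
    · exact Or.inl (h1.trans h3)
    · subst h1; exact Or.inr ⟨h3, h4⟩
    · subst h3; exact Or.inr ⟨h1, h2⟩
    · exact Or.inr ⟨h1, h4⟩

-- ---------- small Set helpers ----------

theorem pvContains_add (v : PySem.Set String) (cur x : String) :
    PySem.Set.contains (PySem.Set.add v cur) x = (PySem.Set.contains v x || x == cur) := by
  by_cases h : cur ∈ v
  · rw [PySem.Set.add_of_mem h]
    by_cases hx : x = cur
    · subst hx; simp [PySem.Set.contains_eq_listContains, h]
    · simp [hx]
  · rw [PySem.Set.add_of_not_mem h]
    simp [PySem.Set.contains_eq_listContains, beq_eq_decide]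

theorem pvMem_of_contains {v : PySem.Set String} {a : String}
    (h : PySem.Set.contains v a = true) : a ∈ v := by
  simpa [PySem.Set.contains_eq_listContains] using h

theorem pvNotMem_of_contains {v : PySem.Set String} {a : String}
    (h : PySem.Set.contains v a = false) : a ∉ v := by
  simpa [PySem.Set.contains_eq_listContains] using h

theorem pvPush_eq (v' : PySem.Set String) :
    ∀ (l acc : List String),
    l.foldl (fun s n => if PySem.Set.contains v' n then s else n :: s) acc =
    (l.filter (fun n => !(PySem.Set.contains v' n))).reverse ++ acc := by
  intro l
  induction l with
  | nil => simp
  | cons a t ih =>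
    intro acc
    cases hva : PySem.Set.contains v' a with
    | true =>
      rw [List.foldl_cons, if_pos hva, ih,
        List.filter_cons_of_neg (by simp [pvMem_of_contains hva])]
    | false =>
      rw [List.foldl_cons, if_neg (by rw [hva]; simp), ih,
        List.filter_cons_of_pos (by simp [pvNotMem_of_contains hva]), List.reverse_cons,
        List.append_assoc, List.singleton_append]

-- ---------- well-formedness of the graph and the fuel measure ----------

def pvClosed (g : PySem.Dict String (PySem.Set String)) : Prop :=
  ∀ p ∈ g.items, ∀ x ∈ p.2, x ∈ g.keys

theorem pvFilter_sublist {α : Type} (l : List α) (p q : α → Bool)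
    (h : ∀ x, q x = true → p x = true) : List.Sublist (l.filter q) (l.filter p) := by
  induction l with
  | nil => simp
  | cons a t ih =>
    by_cases hq : q a = true
    · rw [List.filter_cons_of_pos hq, List.filter_cons_of_pos (h a hq)]
      exact ih.cons₂ a
    · rw [List.filter_cons_of_neg (by simpa using hq)]
      by_cases hp : p a = true
      · rw [List.filter_cons_of_pos hp]; exact ih.cons a
      · rw [List.filter_cons_of_neg (by simpa using hp)]; exact ih

def pvU (g : PySem.Dict String (PySem.Set String)) (v : PySem.Set String) : Nat :=
  ((g.keys.filter (fun k => !(PySem.Set.contains v k))).map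
    (fun k => 1 + (g.getD k PySem.Set.empty).length)).sum

theorem pvU_mono (g : PySem.Dict String (PySem.Set String)) (v w : PySem.Set String)
    (h : ∀ x, PySem.Set.contains v x = true → PySem.Set.contains w x = true) :
    pvU g w ≤ pvU g v := by
  unfold pvU
  apply List.Sublist.sum_le_sum _ (by simp)
  apply List.Sublist.map
  apply pvFilter_sublist
  intro x hx
  by_cases hv : x ∈ v
  · have hvt : PySem.Set.contains v x = true := by
      simp [PySem.Set.contains_eq_listContains, hv]
    rw [h x hvt] at hx
    simp at hx
  · simp [PySem.Set.contains_eq_listContains, hv]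

theorem pvU_le (g : PySem.Dict String (PySem.Set String)) (v : PySem.Set String)
    (hnd : g.keys.Nodup) :
    pvU g v ≤ g.items.length + (g.items.map (fun p => p.2.length)).sum := by
  have h1 : pvU g v ≤ pvU g PySem.Set.empty := by
    apply pvU_mono
    intro x hx
    simp [PySem.Set.contains_eq_listContains] at hx
  refine le_trans h1 ?_
  unfold pvU
  have hfil : (g.keys.filter (fun k => !(PySem.Set.contains PySem.Set.empty k))) = g.keys := by
    apply List.filter_eq_self.mpr
    intro a _
    simp [PySem.Set.contains_eq_listContains, PySem.Set.empty]
  rw [hfil]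
  have hsum : ∀ (l : List String) (f : String → Nat),
      (l.map (fun k => 1 + f k)).sum = l.length + (l.map f).sum := by
    intro l f
    induction l with
    | nil => simp
    | cons a t ih => simp [ih]; omega
  rw [hsum]
  have hvals : g.values = g.keys.map (fun k => g.getD k PySem.Set.empty) :=
    PySem.Dict.values_eq_map_keys g hnd _
  have hlen : g.items.length = g.keys.length := by
    simp [PySem.Dict.keys]
  have hmap : (g.items.map (fun p => p.2.length)).sum
      = ((g.keys.map (fun k => g.getD k PySem.Set.empty)).map (fun s => s.length)).sum := by
    rw [← hvals]
    simp only [PySem.Dict.values, List.map_map]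
    rfl
  rw [hmap, hlen, List.map_map]
  exact Nat.add_le_add_left (le_of_eq rfl) _

theorem pvU_lt (g : PySem.Dict String (PySem.Set String)) (v : PySem.Set String)
    (hnd : g.keys.Nodup) : pvU g v < pvFuelA g := by
  have h := pvU_le g v hnd
  have h2 : pvFuelA g = 1 + g.items.length + (g.items.map (fun p => p.2.length)).sum := rfl
  omega

theorem pvU_visit (g : PySem.Dict String (PySem.Set String)) (v : PySem.Set String)
    (hnd : g.keys.Nodup) (cur : String) (hk : cur ∈ g.keys)
    (hv : PySem.Set.contains v cur = false) :
    pvU g v = pvU g (PySem.Set.add v cur) + (1 + (g.getD cur PySem.Set.empty).length) := by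
  unfold pvU
  set f : String → Nat := fun k => 1 + (g.getD k PySem.Set.empty).length with hf
  set m := g.keys.filter (fun k => !(PySem.Set.contains v k)) with hm
  have hmnd : m.Nodup := hnd.filter _
  have hcm : cur ∈ m := by
    rw [hm, List.mem_filter]
    refine ⟨hk, ?_⟩
    simpa using hv
  have h2 : g.keys.filter (fun k => !(PySem.Set.contains (PySem.Set.add v cur) k))
      = m.filter (fun x => !(x == cur)) := by
    rw [hm, List.filter_filter]
    apply List.filter_congr
    intro x _
    rw [pvContains_add]
    cases hvx : PySem.Set.contains v x <;> cases hxc : (x == cur) <;> simp [*]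
  rw [h2]
  have h3 : m.filter (fun x => !(x == cur)) = m.erase cur := by
    rw [List.Nodup.erase_eq_filter hmnd]; simp [bne]
  rw [h3]
  have hperm : List.Perm m (cur :: m.erase cur) := List.perm_cons_erase hcm
  have hsum := (hperm.map f).sum_eq
  rw [hsum, List.map_cons, List.sum_cons]
  simp only [hf]
  omega

theorem pvClosed_getD (g : PySem.Dict String (PySem.Set String))
    (hcl : pvClosed g) (cur x : String) (hx : x ∈ g.getD cur PySem.Set.empty) : x ∈ g.keys := by
  cases hc : g.contains cur
  · rw [PySem.Dict.getD_of_not_contains g PySem.Set.empty hc] at hx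
    simp [PySem.Set.empty] at hx
  · have hsome : ∃ w, g.get? cur = some w := by
      have h2 := PySem.Dict.contains_eq_isSome_get? (d := g) (k := cur)
      rw [hc] at h2
      exact Option.isSome_iff_exists.mp h2.symm
    obtain ⟨w, hw⟩ := hsome
    have hmem := PySem.Dict.mem_items_of_get?_eq_some g hw
    have hgd : g.getD cur PySem.Set.empty = w := by
      rw [PySem.Dict.getD_eq_get?_getD, hw]; rfl
    rw [hgd] at hx
    exact hcl _ hmem x hx

def pvW (d : PySem.Dict String (PySem.Set String)) : Prop := d.keys.Nodup ∧ pvClosed d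

theorem pvW_empty : pvW (PySem.Dict.empty : PySem.Dict String (PySem.Set String)) := by
  constructor
  · rw [PySem.Dict.keys_empty]; exact List.nodup_nil
  · intro p hp
    simp [PySem.Dict.empty] at hp

theorem pvW_setdefault (d : PySem.Dict String (PySem.Set String)) (k : String) (h : pvW d) :
    pvW (d.setdefault k PySem.Set.empty) ∧
    (∀ y ∈ d.keys, y ∈ (d.setdefault k PySem.Set.empty).keys) ∧
    k ∈ (d.setdefault k PySem.Set.empty).keys := by
  cases hc : d.contains k with
  | true =>
    rw [PySem.Dict.setdefault_of_contains d PySem.Set.empty hc]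
    exact ⟨h, fun y hy => hy, (PySem.Dict.contains_iff_mem_keys d k).mp hc⟩
  | false =>
    rw [PySem.Dict.setdefault_of_not_contains d PySem.Set.empty hc]
    have hknot : k ∉ d.keys := by
      intro hm
      rw [(PySem.Dict.contains_iff_mem_keys d k).mpr hm] at hc
      cases hc
    have hkeys := PySem.Dict.keys_insert_of_not_contains d PySem.Set.empty hc
    refine ⟨⟨?_, ?_⟩, ?_, ?_⟩
    · rw [hkeys, List.nodup_append]
      refine ⟨h.1, by simp, ?_⟩
      intro a ha b hb
      have hbk : b = k := List.mem_singleton.mp hb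
      intro hab
      rw [hab, hbk] at ha
      exact hknot ha
    · intro p hp x hx
      rw [PySem.Dict.items_insert_of_not_contains d PySem.Set.empty hc] at hp
      rw [hkeys]
      rcases List.mem_append.mp hp with hp | hp
      · exact List.mem_append.mpr (Or.inl (h.2 p hp x hx))
      · simp at hp
        rw [hp] at hx
        simp at hx
    · intro y hy
      rw [hkeys]
      exact List.mem_append.mpr (Or.inl hy)
    · rw [hkeys]; simp

theorem pvW_addedge (d : PySem.Dict String (PySem.Set String)) (ck pk : String) (h : pvW d)
    (hck : ck ∈ d.keys) (hpk : pk ∈ d.keys) :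
    pvW (d.modify ck PySem.Set.empty (fun s => PySem.Set.add s pk)) ∧
    (d.modify ck PySem.Set.empty (fun s => PySem.Set.add s pk)).keys = d.keys := by
  have hc : d.contains ck = true := (PySem.Dict.contains_iff_mem_keys d ck).mpr hck
  have hmod : d.modify ck PySem.Set.empty (fun s => PySem.Set.add s pk)
      = d.insert ck (PySem.Set.add (d.getD ck PySem.Set.empty) pk) := rfl
  have hkeys := PySem.Dict.keys_insert_of_contains d
    (PySem.Set.add (d.getD ck PySem.Set.empty) pk) hc
  rw [hmod]
  refine ⟨⟨by rw [hkeys]; exact h.1, ?_⟩, hkeys⟩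
  intro p hp x hx
  rw [PySem.Dict.items_insert_of_contains d _ hc] at hp
  rw [hkeys]
  obtain ⟨q, hq, hqe⟩ := List.mem_map.mp hp
  by_cases hqk : (q.1 == ck) = true
  · rw [if_pos hqk] at hqe
    rw [← hqe] at hx
    simp only at hx
    rcases (PySem.Set.mem_add _ _ _).mp hx with hx | hx
    · exact pvClosed_getD d h.2 ck x hx
    · rw [hx]; exact hpk
  · rw [if_neg hqk] at hqe
    rw [← hqe] at hx
    exact h.2 q hq x hx

-- ---------- how each construction step changes the adjacency relation ----------

theorem pvAdj_setdefault (g : PySem.Dict String (PySem.Set String)) (k x y : String) :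
    pvAdj (g.setdefault k PySem.Set.empty) x y ↔ pvAdj g x y := by
  unfold pvAdj
  cases hc : g.contains k with
  | true => rw [PySem.Dict.setdefault_of_contains g PySem.Set.empty hc]
  | false =>
    rw [PySem.Dict.setdefault_of_not_contains g PySem.Set.empty hc,
      PySem.Dict.getD_insert]
    by_cases hx : x = k
    · rw [if_pos hx, hx, PySem.Dict.getD_of_not_contains g PySem.Set.empty hc]
    · rw [if_neg hx]

theorem pvAdj_edge (g : PySem.Dict String (PySem.Set String)) (ck pk x y : String) :
    pvAdj ((g.modify ck PySem.Set.empty (fun s => PySem.Set.add s pk)).modify pk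
      PySem.Set.empty (fun s => PySem.Set.add s ck)) x y ↔
    (pvAdj g x y ∨ (x = ck ∧ y = pk) ∨ (x = pk ∧ y = ck)) := by
  unfold pvAdj
  simp only [PySem.Dict.getD_modify]
  split_ifs <;> simp_all [PySem.Set.mem_add]

-- ---------- the union (relabeling) fold of B ----------

theorem pvUnionFold_get? (b a : String) :
    ∀ (ps : List (String × String)) (d : PySem.Dict String String) (x : String),
    (pvUnionFold b a ps d).get? x = if (x, b) ∈ ps then some a else d.get? x := by
  intro ps
  induction ps with
  | nil => intro d x; simp [pvUnionFold]
  | cons p rest ih =>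
    intro d x
    have hstep : pvUnionFold b a (p :: rest) d
        = pvUnionFold b a rest (if p.2 == b then d.insert p.1 a else d) := rfl
    rw [hstep, ih]
    by_cases hr : (x, b) ∈ rest
    · rw [if_pos hr, if_pos (List.mem_cons.mpr (Or.inr hr))]
    · rw [if_neg hr]
      by_cases hpb : p.2 = b
      · rw [if_pos (by simp [hpb])]
        by_cases hxp : x = p.1
        · have hmem : (x, b) ∈ p :: rest := by
            rw [List.mem_cons]
            refine Or.inl ?_
            rw [hxp, ← hpb]
          rw [if_pos hmem, hxp, PySem.Dict.get?_insert_self]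
        · have hnm : (x, b) ∉ p :: rest := by
            rw [List.mem_cons]
            rintro (h | h)
            · exact hxp (congrArg Prod.fst h)
            · exact hr h
          rw [if_neg hnm, PySem.Dict.get?_insert_of_ne d a hxp]
      · rw [if_neg (by simp [hpb])]
        have hnm : (x, b) ∉ p :: rest := by
          rw [List.mem_cons]
          rintro (h | h)
          · exact hpb (congrArg Prod.snd h).symm
          · exact hr h
        rw [if_neg hnm]

theorem pvUnionFold_keys (b a : String) :
    ∀ (ps : List (String × String)) (d : PySem.Dict String String),
    (∀ p ∈ ps, p.1 ∈ d.keys) →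
    (pvUnionFold b a ps d).keys = d.keys := by
  intro ps
  induction ps with
  | nil => intro d _; rfl
  | cons p rest ih =>
    intro d hmem
    have hstep : pvUnionFold b a (p :: rest) d
        = pvUnionFold b a rest (if p.2 == b then d.insert p.1 a else d) := rfl
    rw [hstep]
    have hkeys : (if p.2 == b then d.insert p.1 a else d).keys = d.keys := by
      by_cases hpb : (p.2 == b) = true
      · rw [if_pos hpb]
        exact PySem.Dict.keys_insert_of_contains d a
          ((PySem.Dict.contains_iff_mem_keys d p.1).mpr (hmem p (by simp)))
      · rw [if_neg hpb]
    rw [ih _ (fun q hq => by rw [hkeys]; exact hmem q (by simp [hq])), hkeys]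

theorem pvUnion_getD (b a : String) (d : PySem.Dict String String)
    (hnd : d.keys.Nodup) (x : String) (hx : x ∈ d.keys) :
    (pvUnionFold b a d.items d).getD x "" = if d.getD x "" = b then a else d.getD x "" := by
  have hget := pvUnionFold_get? b a d.items d x
  have hsome : d.get? x = some (d.getD x "") := by
    cases hq : d.get? x with
    | none =>
      exact absurd hx (by
        rw [← PySem.Dict.contains_iff_mem_keys,
          PySem.Dict.contains_eq_isSome_get?, hq]
        simp)
    | some w => rw [PySem.Dict.getD_of_get?_eq_some d "" hq]
  have hmem_iff : ((x, b) ∈ d.items) ↔ d.getD x "" = b := by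
    rw [← PySem.Dict.get?_eq_some_iff_mem_items d x b hnd, hsome]
    constructor
    · intro h; injection h
    · intro h; rw [h]
  rw [PySem.Dict.getD_eq_get?_getD, hget]
  by_cases hb : d.getD x "" = b
  · rw [if_pos (hmem_iff.mpr hb), if_pos hb]; rfl
  · rw [if_neg (fun h => hb (hmem_iff.mp h)), if_neg hb, hsome]; rfl

-- collapsing EqvGen extensions by already-related pairs
theorem pvEqvGen_absorb {α : Type} (r : α → α → Prop) (u v : α)
    (huv : Relation.EqvGen r u v) :
    ∀ x y, Relation.EqvGen (fun a b => r a b ∨ (a = u ∧ b = v)) x y ↔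
      Relation.EqvGen r x y := by
  intro x y
  rw [pvEqvGen_ext]
  constructor
  · rintro (h | ⟨h1, h2⟩ | ⟨h1, h2⟩)
    · exact h
    · exact (h1.trans _ _ _ huv).trans _ _ _ h2
    · exact (h1.trans _ _ _ (huv.symm _ _)).trans _ _ _ h2
  · exact fun h => Or.inl h

-- ---------- the parallel invariant: graph construction vs label construction ----------

def pvLink (g : PySem.Dict String (PySem.Set String)) (d : PySem.Dict String String) : Prop :=
  g.keys = d.keys ∧ pvW g ∧ (∀ x y, pvAdj g x y → pvAdj g y x) ∧
  (∀ x ∈ d.keys, d.getD x "" ∈ d.keys) ∧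
  (∀ x ∈ d.keys, d.getD (d.getD x "") "" = d.getD x "") ∧
  (∀ x ∈ d.keys, ∀ y ∈ d.keys,
    (d.getD x "" = d.getD y "" ↔ Relation.EqvGen (pvAdj g) x y))

theorem pvAdj_mem_left {g : PySem.Dict String (PySem.Set String)}
    (hcl : pvClosed g) (hsym : ∀ x y, pvAdj g x y → pvAdj g y x)
    {x y : String} (h : pvAdj g x y) : x ∈ g.keys :=
  pvClosed_getD g hcl y x (hsym x y h)

theorem pvAdj_mem_right {g : PySem.Dict String (PySem.Set String)}
    (hcl : pvClosed g) {x y : String} (h : pvAdj g x y) : y ∈ g.keys :=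
  pvClosed_getD g hcl x y h

theorem pvLink_empty : pvLink PySem.Dict.empty PySem.Dict.empty := by
  have hadj : ∀ x y, ¬ pvAdj (PySem.Dict.empty : PySem.Dict String (PySem.Set String)) x y := by
    intro x y h
    unfold pvAdj at h
    rw [PySem.Dict.getD_empty] at h
    simp [PySem.Set.empty] at h
  refine ⟨rfl, pvW_empty, ?_, ?_, ?_, ?_⟩
  · exact fun x y h => absurd h (hadj x y)
  · intro x hx; rw [PySem.Dict.keys_empty] at hx; cases hx
  · intro x hx; rw [PySem.Dict.keys_empty] at hx; cases hx
  · intro x hx; rw [PySem.Dict.keys_empty] at hx; cases hx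

theorem pvLink_setdefault (g : PySem.Dict String (PySem.Set String))
    (d : PySem.Dict String String) (k : String) (h : pvLink g d) :
    pvLink (g.setdefault k PySem.Set.empty) (d.setdefault k k) ∧
    (∀ y ∈ d.keys, y ∈ (d.setdefault k k).keys) ∧ k ∈ (d.setdefault k k).keys := by
  obtain ⟨hkeq, hW, hsym, hlk, hidem, hfib⟩ := h
  have hcd : d.contains k = g.contains k := by
    cases hc : g.contains k with
    | true =>
      rw [(PySem.Dict.contains_iff_mem_keys d k).mpr
        (hkeq ▸ (PySem.Dict.contains_iff_mem_keys g k).mp hc)]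
    | false =>
      cases hd : d.contains k with
      | true =>
        exact absurd ((PySem.Dict.contains_iff_mem_keys g k).mpr
          (hkeq ▸ (PySem.Dict.contains_iff_mem_keys d k).mp hd)) (by rw [hc]; simp)
      | false => rfl
  cases hc : g.contains k with
  | true =>
    rw [PySem.Dict.setdefault_of_contains g PySem.Set.empty hc,
      PySem.Dict.setdefault_of_contains d k (by rw [hcd, hc])]
    exact ⟨⟨hkeq, hW, hsym, hlk, hidem, hfib⟩, fun y hy => hy,
      hkeq ▸ (PySem.Dict.contains_iff_mem_keys g k).mp hc⟩
  | false =>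
    have hcd' : d.contains k = false := by rw [hcd, hc]
    have hknot : k ∉ d.keys := fun hm =>
      absurd ((PySem.Dict.contains_iff_mem_keys d k).mpr hm) (by rw [hcd']; simp)
    -- getD on the new label dict
    have hgetD : ∀ x, (d.setdefault k k).getD x "" = if x = k then k else d.getD x "" := by
      intro x
      rw [PySem.Dict.setdefault_of_not_contains d k hcd', PySem.Dict.getD_insert]
    have hkeys' : (d.setdefault k k).keys = d.keys ++ [k] := by
      rw [PySem.Dict.setdefault_of_not_contains d k hcd']
      exact PySem.Dict.keys_insert_of_not_contains d k hcd'
    have hadj : ∀ x y, pvAdj (g.setdefault k PySem.Set.empty) x y ↔ pvAdj g x y :=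
      fun x y => pvAdj_setdefault g k x y
    have hE : ∀ x y, Relation.EqvGen (pvAdj (g.setdefault k PySem.Set.empty)) x y ↔
        Relation.EqvGen (pvAdj g) x y := pvEqvGen_iff_of_iff hadj
    obtain ⟨hW', hmono, hkmem⟩ := pvW_setdefault g k hW
    have hknotg : k ∉ g.keys := hkeq ▸ hknot
    have hxnk : ∀ {x : String}, x ∈ d.keys → x ≠ k :=
      fun {x} hx (he : x = k) => hknot (he ▸ hx)
    have hne_k : ∀ a b, pvAdj g a b → a ≠ k ∧ b ≠ k := by
      intro a b hab
      exact ⟨fun he => hknotg (he ▸ pvAdj_mem_left hW.2 hsym hab),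
        fun he => hknotg (he ▸ pvAdj_mem_right hW.2 hab)⟩
    refine ⟨⟨?_, hW', ?_, ?_, ?_, ?_⟩, ?_, ?_⟩
    · rw [PySem.Dict.setdefault_of_not_contains g PySem.Set.empty hc,
        PySem.Dict.keys_insert_of_not_contains g PySem.Set.empty hc, hkeys', hkeq]
    · exact fun x y hxy => (hadj y x).mpr (hsym x y ((hadj x y).mp hxy))
    · intro x hx
      rw [hkeys'] at hx
      rw [hkeys', hgetD x]
      rcases List.mem_append.mp hx with hx | hx
      · rw [if_neg (hxnk hx)]
        exact List.mem_append.mpr (Or.inl (hlk x hx))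
      · rw [if_pos (List.mem_singleton.mp hx)]
        exact List.mem_append.mpr (Or.inr (by simp))
    · intro x hx
      rw [hkeys'] at hx
      rw [hgetD x]
      rcases List.mem_append.mp hx with hx | hx
      · rw [if_neg (hxnk hx), hgetD (d.getD x ""), if_neg (hxnk (hlk x hx))]
        exact hidem x hx
      · rw [if_pos (List.mem_singleton.mp hx), hgetD k, if_pos rfl]
    · intro x hx y hy
      rw [hkeys'] at hx hy
      rw [hgetD x, hgetD y, hE x y]
      rcases List.mem_append.mp hx with hx | hx <;>
        rcases List.mem_append.mp hy with hy | hy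
      · rw [if_neg (hxnk hx), if_neg (hxnk hy)]
        exact hfib x hx y hy
      · have hyk : y = k := List.mem_singleton.mp hy
        rw [if_neg (hxnk hx), if_pos hyk]
        constructor
        · intro he; exact absurd (hlk x hx) (he ▸ hknot)
        · intro he
          rcases pvEqvGen_ne (pvAdj g) k hne_k x y he with he2 | ⟨_, he2⟩
          · exact absurd (he2 ▸ hx) (hyk ▸ hknot)
          · exact absurd hyk he2
      · have hxk : x = k := List.mem_singleton.mp hx
        rw [if_pos hxk, if_neg (hxnk hy)]
        constructor
        · intro he
          exact absurd (hlk y hy) (by rw [← he]; exact fun hm => hknot (List.mem_singleton.mp hx ▸ hm))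
        · intro he
          rcases pvEqvGen_ne (pvAdj g) k hne_k y x (he.symm _ _) with he2 | ⟨_, he2⟩
          · exact absurd (he2 ▸ hy) (hxk ▸ hknot)
          · exact absurd hxk he2
      · rw [if_pos (List.mem_singleton.mp hx), if_pos (List.mem_singleton.mp hy)]
        have : x = y := by
          rw [List.mem_singleton.mp hx, List.mem_singleton.mp hy]
        exact ⟨fun _ => this ▸ Relation.EqvGen.refl x, fun _ => rfl⟩
    · intro y hy
      rw [hkeys']
      exact List.mem_append.mpr (Or.inl hy)
    · rw [hkeys']
      exact List.mem_append.mpr (Or.inr (by simp))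

theorem pvLink_edge (g : PySem.Dict String (PySem.Set String))
    (d : PySem.Dict String String) (ck pk : String) (h : pvLink g d)
    (hck : ck ∈ d.keys) (hpk : pk ∈ d.keys) :
    pvLink ((g.modify ck PySem.Set.empty (fun s => PySem.Set.add s pk)).modify pk
        PySem.Set.empty (fun s => PySem.Set.add s ck))
      (if d.getD ck "" ≠ d.getD pk "" then
        pvUnionFold (d.getD pk "") (d.getD ck "") d.items d else d) ∧
    (if d.getD ck "" ≠ d.getD pk "" then
        pvUnionFold (d.getD pk "") (d.getD ck "") d.items d else d).keys = d.keys := by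
  obtain ⟨hkeq, hW, hsym, hlk, hidem, hfib⟩ := h
  have hckg : ck ∈ g.keys := by rw [hkeq]; exact hck
  have hpkg : pk ∈ g.keys := by rw [hkeq]; exact hpk
  obtain ⟨hW1, hk1⟩ := pvW_addedge g ck pk hW hckg hpkg
  obtain ⟨hW2, hk2⟩ := pvW_addedge (g.modify ck PySem.Set.empty (fun s => PySem.Set.add s pk))
    pk ck hW1 (by rw [hk1]; exact hpkg) (by rw [hk1]; exact hckg)
  have hkg' : ((g.modify ck PySem.Set.empty (fun s => PySem.Set.add s pk)).modify pk
      PySem.Set.empty (fun s => PySem.Set.add s ck)).keys = g.keys := by rw [hk2, hk1]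
  have hA := pvAdj_edge g ck pk
  have hsym' : ∀ x y, pvAdj ((g.modify ck PySem.Set.empty (fun s => PySem.Set.add s pk)).modify pk
      PySem.Set.empty (fun s => PySem.Set.add s ck)) x y →
      pvAdj ((g.modify ck PySem.Set.empty (fun s => PySem.Set.add s pk)).modify pk
      PySem.Set.empty (fun s => PySem.Set.add s ck)) y x := by
    intro x y hxy
    rw [hA] at hxy ⊢
    rcases hxy with h1 | h1 | h1
    · exact Or.inl (hsym x y h1)
    · exact Or.inr (Or.inr ⟨h1.2, h1.1⟩)
    · exact Or.inr (Or.inl ⟨h1.2, h1.1⟩)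
  -- the equivalence generated by the new graph
  have hE1 : ∀ x y, Relation.EqvGen (pvAdj ((g.modify ck PySem.Set.empty
      (fun s => PySem.Set.add s pk)).modify pk PySem.Set.empty (fun s => PySem.Set.add s ck))) x y ↔
      Relation.EqvGen (fun x y => (pvAdj g x y ∨ (x = ck ∧ y = pk)) ∨ (x = pk ∧ y = ck)) x y := by
    apply pvEqvGen_iff_of_iff
    intro a' b'
    rw [hA]
    tauto
  have hr1 : Relation.EqvGen (fun x y => pvAdj g x y ∨ (x = ck ∧ y = pk)) pk ck :=
    Relation.EqvGen.symm _ _ (Relation.EqvGen.rel _ _ (Or.inr ⟨rfl, rfl⟩))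
  have hEg' : ∀ x y, Relation.EqvGen (pvAdj ((g.modify ck PySem.Set.empty
      (fun s => PySem.Set.add s pk)).modify pk PySem.Set.empty (fun s => PySem.Set.add s ck))) x y ↔
      (Relation.EqvGen (pvAdj g) x y ∨
        (Relation.EqvGen (pvAdj g) x ck ∧ Relation.EqvGen (pvAdj g) pk y) ∨
        (Relation.EqvGen (pvAdj g) x pk ∧ Relation.EqvGen (pvAdj g) ck y)) := by
    intro x y
    rw [hE1 x y, pvEqvGen_absorb _ pk ck hr1 x y, pvEqvGen_ext (pvAdj g) ck pk x y]
  by_cases hab : d.getD ck "" = d.getD pk ""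
  · rw [if_neg (fun hne => hne hab)]
    have hEckpk : Relation.EqvGen (pvAdj g) ck pk := (hfib ck hck pk hpk).mp hab
    have hcoll : ∀ x y, Relation.EqvGen (pvAdj ((g.modify ck PySem.Set.empty
        (fun s => PySem.Set.add s pk)).modify pk PySem.Set.empty (fun s => PySem.Set.add s ck))) x y ↔
        Relation.EqvGen (pvAdj g) x y := by
      intro x y
      rw [hEg' x y]
      constructor
      · rintro (h1 | ⟨h1, h2⟩ | ⟨h1, h2⟩)
        · exact h1
        · exact (h1.trans _ _ _ hEckpk).trans _ _ _ h2
        · exact (h1.trans _ _ _ (hEckpk.symm _ _)).trans _ _ _ h2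
      · exact fun h1 => Or.inl h1
    refine ⟨⟨by rw [hkg', hkeq], hW2, hsym', hlk, hidem, ?_⟩, rfl⟩
    intro x hx y hy
    rw [hcoll x y]
    exact hfib x hx y hy
  · rw [if_pos hab]
    have hndd : d.keys.Nodup := by rw [← hkeq]; exact hW.1
    have hkeys' : (pvUnionFold (d.getD pk "") (d.getD ck "") d.items d).keys = d.keys :=
      pvUnionFold_keys _ _ d.items d (fun p hp => PySem.Dict.mem_keys_of_mem_items d hp)
    have hlab' : ∀ x ∈ d.keys,
        (pvUnionFold (d.getD pk "") (d.getD ck "") d.items d).getD x "" =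
        if d.getD x "" = d.getD pk "" then d.getD ck "" else d.getD x "" :=
      fun x hx => pvUnion_getD (d.getD pk "") (d.getD ck "") d hndd x hx
    -- lab x = lab pkiff connectivity shortcuts
    have hxb_iff : ∀ x ∈ d.keys, (d.getD x "" = d.getD pk "" ↔ Relation.EqvGen (pvAdj g) x pk) :=
      fun x hx => hfib x hx pk hpk
    have hxa_iff : ∀ x ∈ d.keys, (d.getD x "" = d.getD ck "" ↔ Relation.EqvGen (pvAdj g) x ck) :=
      fun x hx => hfib x hx ck hck
    refine ⟨⟨by rw [hkg', hkeq, hkeys'], hW2, hsym', ?_, ?_, ?_⟩, hkeys'⟩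
    · -- labels stay inside the key set
      intro x hx
      rw [hkeys'] at hx ⊢
      rw [hlab' x hx]
      by_cases hxb : d.getD x "" = d.getD pk ""
      · rw [if_pos hxb]; exact hlk ck hck
      · rw [if_neg hxb]; exact hlk x hx
    · -- idempotence
      intro x hx
      rw [hkeys'] at hx
      rw [hlab' x hx]
      by_cases hxb : d.getD x "" = d.getD pk ""
      · rw [if_pos hxb, hlab' (d.getD ck "") (hlk ck hck), hidem ck hck, if_neg hab]
      · rw [if_neg hxb, hlab' (d.getD x "") (hlk x hx), hidem x hx, if_neg hxb]
    · -- the fibers are exactly the new connectivity classes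
      intro x hx y hy
      rw [hkeys'] at hx hy
      rw [hlab' x hx, hlab' y hy, hEg' x y]
      by_cases hxb : d.getD x "" = d.getD pk "" <;>
        by_cases hyb : d.getD y "" = d.getD pk ""
      · rw [if_pos hxb, if_pos hyb]
        constructor
        · intro _
          exact Or.inl (((hxb_iff x hx).mp hxb).trans _ _ _
            (((hxb_iff y hy).mp hyb).symm _ _))
        · intro _; rfl
      · rw [if_pos hxb, if_neg hyb]
        constructor
        · intro he
          exact Or.inr (Or.inr ⟨(hxb_iff x hx).mp hxb,
            ((hxa_iff y hy).mp he.symm).symm _ _⟩)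
        · rintro (h1 | ⟨h1, h2⟩ | ⟨h1, h2⟩)
          · exact absurd (((hfib x hx y hy).mpr h1) ▸ hxb) hyb
          · exact absurd (((hxa_iff x hx).mpr h1).symm.trans hxb) hab
          · exact ((hxa_iff y hy).mpr (h2.symm _ _)).symm
      · rw [if_neg hxb, if_pos hyb]
        constructor
        · intro he
          exact Or.inr (Or.inl ⟨(hxa_iff x hx).mp he, ((hxb_iff y hy).mp hyb).symm _ _⟩)
        · rintro (h1 | ⟨h1, h2⟩ | ⟨h1, h2⟩)
          · exact absurd (((hfib x hx y hy).mpr h1).symm ▸ hyb) hxb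
          · exact (hxa_iff x hx).mpr h1
          · exact absurd ((hxb_iff x hx).mpr h1) hxb
      · rw [if_neg hxb, if_neg hyb]
        constructor
        · intro he
          exact Or.inl ((hfib x hx y hy).mp he)
        · rintro (h1 | ⟨h1, h2⟩ | ⟨h1, h2⟩)
          · exact (hfib x hx y hy).mpr h1
          · exact absurd ((hxb_iff y hy).mpr (h2.symm _ _)) hyb
          · exact absurd ((hxb_iff x hx).mpr h1) hxb

theorem pvLink_inner (ck : String) :
    ∀ (parents : List String) (g : PySem.Dict String (PySem.Set String))
      (d : PySem.Dict String String),
    pvLink g d → ck ∈ d.keys →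
    pvLink (parents.foldl (fun g pk =>
        let g := g.setdefault pk PySem.Set.empty
        let g := g.modify ck PySem.Set.empty (fun s => PySem.Set.add s pk)
        g.modify pk PySem.Set.empty (fun s => PySem.Set.add s ck)) g)
      (parents.foldl (fun label pk =>
        let label := label.setdefault pk pk
        let a := label.getD ck ""
        let b := label.getD pk ""
        if a ≠ b then pvUnionFold b a label.items label else label) d) ∧
    (∀ y ∈ d.keys, y ∈ (parents.foldl (fun label pk =>
        let label := label.setdefault pk pk
        let a := label.getD ck ""
        let b := label.getD pk ""
        if a ≠ b then pvUnionFold b a label.items label else label) d).keys) := by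
  intro parents
  induction parents with
  | nil => exact fun g d h _ => ⟨h, fun y hy => hy⟩
  | cons pk rest ih =>
    intro g d h hck
    simp only [List.foldl_cons]
    obtain ⟨hL1, hmono1, hpk1⟩ := pvLink_setdefault g d pk h
    obtain ⟨hL2, hk2⟩ := pvLink_edge (g.setdefault pk PySem.Set.empty)
      (d.setdefault pk pk) ck pk hL1 (hmono1 ck hck) hpk1
    have hck2 : ck ∈ (if (d.setdefault pk pk).getD ck "" ≠ (d.setdefault pk pk).getD pk "" then
        pvUnionFold ((d.setdefault pk pk).getD pk "") ((d.setdefault pk pk).getD ck "")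
          (d.setdefault pk pk).items (d.setdefault pk pk) else (d.setdefault pk pk)).keys := by
      rw [hk2]; exact hmono1 ck hck
    obtain ⟨hL3, hmono3⟩ := ih _ _ hL2 hck2
    refine ⟨hL3, ?_⟩
    intro y hy
    exact hmono3 y (by rw [hk2]; exact hmono1 y hy)

theorem pvLink_fold :
    ∀ (l : List (String × List String)) (g : PySem.Dict String (PySem.Set String))
      (d : PySem.Dict String String),
    pvLink g d →
    pvLink (l.foldl (fun g kp =>
        let g := g.setdefault kp.1 PySem.Set.empty
        kp.2.foldl (fun g pk =>
          let g := g.setdefault pk PySem.Set.empty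
          let g := g.modify kp.1 PySem.Set.empty (fun s => PySem.Set.add s pk)
          g.modify pk PySem.Set.empty (fun s => PySem.Set.add s kp.1)) g) g)
      (l.foldl (fun label kp =>
        let label := label.setdefault kp.1 kp.1
        kp.2.foldl (fun label pk =>
          let label := label.setdefault pk pk
          let a := label.getD kp.1 ""
          let b := label.getD pk ""
          if a ≠ b then pvUnionFold b a label.items label else label) label) d) := by
  intro l
  induction l with
  | nil => exact fun g d h => h
  | cons kp rest ih =>
    intro g d h
    simp only [List.foldl_cons]
    obtain ⟨hL1, _, hk1⟩ := pvLink_setdefault g d kp.1 h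
    obtain ⟨hL2, _⟩ := pvLink_inner kp.1 kp.2 _ _ hL1 hk1
    exact ih _ _ hL2

theorem pvLink_main (l : List (String × List String)) :
    pvLink (pvGraphA l) (pvLabels l) :=
  pvLink_fold l PySem.Dict.empty PySem.Dict.empty pvLink_empty

-- ---------- DFS loop invariant and component characterization ----------

theorem pvLoopA_cons (g : PySem.Dict String (PySem.Set String)) (fuel : Nat)
    (current : String) (stack : List String) (visited component : PySem.Set String) :
    pvLoopA g (fuel + 1) (current :: stack) visited component =
    if PySem.Set.contains visited current then pvLoopA g fuel stack visited component
    else pvLoopA g fuel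
      ((g.getD current PySem.Set.empty).foldl
        (fun s n => if PySem.Set.contains (PySem.Set.add visited current) n then s else n :: s) stack)
      (PySem.Set.add visited current) (PySem.Set.add component current) := rfl

theorem pvLoopA_inv (g : PySem.Dict String (PySem.Set String)) (hnd : g.keys.Nodup)
    (hcl : pvClosed g) (start : String) (v0 : PySem.Set String) :
    ∀ (fuel : Nat) (stack : List String) (v c : PySem.Set String),
    stack.length + pvU g v ≤ fuel →
    (∀ x ∈ stack, x ∈ g.keys ∧ Relation.EqvGen (pvAdj g) start x) →
    (∀ x ∈ c, x ∈ g.keys ∧ Relation.EqvGen (pvAdj g) start x) →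
    (∀ x, x ∈ v ↔ (x ∈ v0 ∨ x ∈ c)) →
    (∀ x ∈ c, x ∉ v0) →
    (∀ x ∈ c, ∀ y, pvAdj g x y → (y ∈ v ∨ y ∈ stack)) →
    (∀ x, x ∈ (pvLoopA g fuel stack v c).1 ↔ (x ∈ v0 ∨ x ∈ (pvLoopA g fuel stack v c).2)) ∧
    (∀ x ∈ (pvLoopA g fuel stack v c).2, x ∈ g.keys ∧ Relation.EqvGen (pvAdj g) start x) ∧
    (∀ x ∈ (pvLoopA g fuel stack v c).2, x ∉ v0) ∧
    (∀ x ∈ (pvLoopA g fuel stack v c).2, ∀ y, pvAdj g x y → y ∈ (pvLoopA g fuel stack v c).1) ∧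
    (∀ x ∈ stack, x ∈ (pvLoopA g fuel stack v c).1) ∧
    (∀ x ∈ c, x ∈ (pvLoopA g fuel stack v c).2) := by
  intro fuel
  induction fuel with
  | zero =>
    intro stack v c h0 h1 h2 h3 h4 h5
    have hstack : stack = [] := List.eq_nil_of_length_eq_zero (by omega)
    subst hstack
    have hres : pvLoopA g 0 [] v c = (v, c) := rfl
    rw [hres]
    exact ⟨h3, h2, h4,
      fun x hx y hadj => (h5 x hx y hadj).elim (fun h => h) (fun h => absurd h (by simp)),
      fun x hx => absurd hx (by simp), fun x hx => hx⟩
  | succ f ihf =>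
    intro stack v c h0 h1 h2 h3 h4 h5
    cases stack with
    | nil =>
      have hres : pvLoopA g (f + 1) [] v c = (v, c) := rfl
      rw [hres]
      exact ⟨h3, h2, h4,
        fun x hx y hadj => (h5 x hx y hadj).elim (fun h => h) (fun h => absurd h (by simp)),
        fun x hx => absurd hx (by simp), fun x hx => hx⟩
    | cons cur st =>
      rw [pvLoopA_cons]
      cases hvc : PySem.Set.contains v cur with
      | true =>
        rw [if_pos rfl]
        have hcurv : cur ∈ v := pvMem_of_contains hvc
        have h5' : ∀ x ∈ c, ∀ y, pvAdj g x y → (y ∈ v ∨ y ∈ st) := by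
          intro x hx y hadj
          rcases h5 x hx y hadj with hy | hy
          · exact Or.inl hy
          · rcases List.mem_cons.mp hy with hy | hy
            · exact Or.inl (hy ▸ hcurv)
            · exact Or.inr hy
        obtain ⟨C1, C2, C3, C4, C5, C6⟩ := ihf st v c
          (by simp only [List.length_cons] at h0; omega)
          (fun x hx => h1 x (by simp [hx])) h2 h3 h4 h5'
        refine ⟨C1, C2, C3, C4, ?_, C6⟩
        intro x hx
        rcases List.mem_cons.mp hx with hx | hx
        · subst hx
          rcases (h3 x).mp hcurv with hx0 | hxc
          · exact (C1 x).mpr (Or.inl hx0)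
          · exact (C1 x).mpr (Or.inr (C6 x hxc))
        · exact C5 x hx
      | false =>
        rw [if_neg (by simp)]
        have hcurk : cur ∈ g.keys := (h1 cur (by simp)).1
        have hconn : Relation.EqvGen (pvAdj g) start cur := (h1 cur (by simp)).2
        have hcurnv : cur ∉ v := pvNotMem_of_contains hvc
        have hstack' := pvPush_eq (PySem.Set.add v cur) (g.getD cur PySem.Set.empty) st
        set stack' := (g.getD cur PySem.Set.empty).foldl
          (fun s n => if PySem.Set.contains (PySem.Set.add v cur) n then s else n :: s) st
          with hsdef
        have hUv := pvU_visit g v hnd cur hcurk hvc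
        have hlen' : stack'.length ≤ (g.getD cur PySem.Set.empty).length + st.length := by
          rw [hstack', List.length_append, List.length_reverse]
          have := List.length_filter_le
            (fun n => !(PySem.Set.contains (PySem.Set.add v cur) n)) (g.getD cur PySem.Set.empty)
          omega
        have h0' : stack'.length + pvU g (PySem.Set.add v cur) ≤ f := by
          simp only [List.length_cons] at h0
          omega
        have h1' : ∀ x ∈ stack', x ∈ g.keys ∧ Relation.EqvGen (pvAdj g) start x := by
          intro x hx
          rw [hstack'] at hx
          rcases List.mem_append.mp hx with hx | hx
          · rw [List.mem_reverse, List.mem_filter] at hx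
            exact ⟨pvClosed_getD g hcl cur x hx.1,
              hconn.trans _ _ _ (Relation.EqvGen.rel cur x hx.1)⟩
          · exact h1 x (by simp [hx])
        have h2' : ∀ x ∈ PySem.Set.add c cur,
            x ∈ g.keys ∧ Relation.EqvGen (pvAdj g) start x := by
          intro x hx
          rcases (PySem.Set.mem_add c cur x).mp hx with hx | hx
          · exact h2 x hx
          · exact hx ▸ ⟨hcurk, hconn⟩
        have h3' : ∀ x, x ∈ PySem.Set.add v cur ↔ (x ∈ v0 ∨ x ∈ PySem.Set.add c cur) := by
          intro x
          rw [PySem.Set.mem_add, PySem.Set.mem_add, h3 x]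
          tauto
        have h4' : ∀ x ∈ PySem.Set.add c cur, x ∉ v0 := by
          intro x hx
          rcases (PySem.Set.mem_add c cur x).mp hx with hx | hx
          · exact h4 x hx
          · exact hx ▸ (fun hv0 => hcurnv ((h3 cur).mpr (Or.inl hv0)))
        have h5' : ∀ x ∈ PySem.Set.add c cur, ∀ y, pvAdj g x y →
            (y ∈ PySem.Set.add v cur ∨ y ∈ stack') := by
          intro x hx y hadj
          rcases (PySem.Set.mem_add c cur x).mp hx with hx | hx
          · rcases h5 x hx y hadj with hy | hy
            · exact Or.inl ((PySem.Set.mem_add v cur y).mpr (Or.inl hy))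
            · rcases List.mem_cons.mp hy with hy | hy
              · exact Or.inl ((PySem.Set.mem_add v cur y).mpr (Or.inr hy))
              · exact Or.inr (by rw [hstack']; exact List.mem_append.mpr (Or.inr hy))
          · subst hx
            cases hcy : PySem.Set.contains (PySem.Set.add v x) y with
            | true => exact Or.inl (pvMem_of_contains hcy)
            | false =>
              refine Or.inr ?_
              rw [hstack']
              refine List.mem_append.mpr (Or.inl ?_)
              rw [List.mem_reverse, List.mem_filter]
              exact ⟨hadj, by rw [hcy]; simp⟩
        obtain ⟨C1, C2, C3, C4, C5, C6⟩ := ihf stack' (PySem.Set.add v cur)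
          (PySem.Set.add c cur) h0' h1' h2' h3' h4' h5'
        refine ⟨C1, C2, C3, C4, ?_, ?_⟩
        · intro x hx
          rcases List.mem_cons.mp hx with hx | hx
          · subst hx
            exact (C1 x).mpr (Or.inr (C6 x ((PySem.Set.mem_add c x x).mpr (Or.inr rfl))))
          · refine C5 x ?_
            rw [hstack']
            exact List.mem_append.mpr (Or.inr hx)
        · intro x hx
          exact C6 x ((PySem.Set.mem_add c cur x).mpr (Or.inl hx))

theorem pvComponent (g : PySem.Dict String (PySem.Set String)) (hnd : g.keys.Nodup)
    (hcl : pvClosed g) (hsym : ∀ x y, pvAdj g x y → pvAdj g y x)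
    (start : String) (v0 : PySem.Set String)
    (hsat : ∀ x ∈ v0, ∀ y, pvAdj g x y → y ∈ v0)
    (hstart : start ∈ g.keys) (hs0 : start ∉ v0) :
    (∀ x, x ∈ (pvLoopA g (pvFuelA g) [start] v0 PySem.Set.empty).2 ↔
      (x ∈ g.keys ∧ Relation.EqvGen (pvAdj g) start x)) ∧
    (∀ x, x ∈ (pvLoopA g (pvFuelA g) [start] v0 PySem.Set.empty).1 ↔
      (x ∈ v0 ∨ x ∈ (pvLoopA g (pvFuelA g) [start] v0 PySem.Set.empty).2)) := by
  obtain ⟨C1, C2, C3, C4, C5, C6⟩ := pvLoopA_inv g hnd hcl start v0 (pvFuelA g) [start] v0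
    PySem.Set.empty
    (by have := pvU_lt g v0 hnd; simp only [List.length_cons, List.length_nil]; omega)
    (by intro x hx
        rcases List.mem_cons.mp hx with hx | hx
        · subst hx; exact ⟨hstart, Relation.EqvGen.refl _⟩
        · exact absurd hx (by simp))
    (by intro x hx; exact absurd hx (by simp [PySem.Set.empty]))
    (by intro x; simp [PySem.Set.empty])
    (by intro x hx; exact absurd hx (by simp [PySem.Set.empty]))
    (by intro x hx; exact absurd hx (by simp [PySem.Set.empty]))
  have hstart_in : start ∈ (pvLoopA g (pvFuelA g) [start] v0 PySem.Set.empty).2 := by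
    rcases (C1 start).mp (C5 start (by simp)) with h | h
    · exact absurd h hs0
    · exact h
  have hcls : ∀ x y, Relation.EqvGen (pvAdj g) x y →
      (x ∈ (pvLoopA g (pvFuelA g) [start] v0 PySem.Set.empty).2 ↔
       y ∈ (pvLoopA g (pvFuelA g) [start] v0 PySem.Set.empty).2) := by
    intro x y hxy
    induction hxy with
    | rel a b hab =>
      constructor
      · intro ha
        rcases (C1 b).mp (C4 a ha b hab) with hb | hb
        · exact absurd (C3 a ha) (fun hna => hna (hsat b hb a (hsym a b hab)))
        · exact hb
      · intro hb
        rcases (C1 a).mp (C4 b hb a (hsym a b hab)) with ha | ha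
        · exact absurd (C3 b hb) (fun hnb => hnb (hsat a ha b hab))
        · exact ha
    | refl a => exact Iff.rfl
    | symm a b _ ih => exact ih.symm
    | trans a b c _ _ ih1 ih2 => exact ih1.trans ih2
  refine ⟨?_, C1⟩
  intro x
  constructor
  · exact fun hx => C2 x hx
  · exact fun ⟨_, hconn⟩ => (hcls start x hconn).mp hstart_in

-- ---------- family building: modify over fresh keys = insert ----------

theorem pvFamStep (comp : List String) :
    ∀ (ms : List String) (fam : PySem.Dict String (PySem.Set String)),
    (∀ m ∈ ms, fam.contains m = false) → ms.Nodup →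
    ms.foldl (fun fam m => fam.modify m PySem.Set.empty (fun s => PySem.Set.update s comp)) fam
    = ms.foldl (fun fam m => fam.insert m (PySem.Set.ofList comp)) fam := by
  intro ms
  induction ms with
  | nil => intro fam _ _; rfl
  | cons m rest ih =>
    intro fam hfr hnd
    simp only [List.foldl_cons]
    have heq : fam.modify m PySem.Set.empty (fun s => PySem.Set.update s comp)
        = fam.insert m (PySem.Set.ofList comp) := by
      show fam.insert m (PySem.Set.update (fam.getD m PySem.Set.empty) comp)
          = fam.insert m (PySem.Set.ofList comp)
      rw [PySem.Dict.getD_of_not_contains fam PySem.Set.empty (hfr m (by simp))]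
      exact congrArg (fam.insert m) (PySem.Set.update_empty comp)
    rw [heq]
    refine ih _ ?_ (List.nodup_cons.mp hnd).2
    intro m' hm'
    rw [PySem.Dict.contains_insert]
    have h1 : (m' == m) = false := by
      have : m' ≠ m := fun he => (List.nodup_cons.mp hnd).1 (he ▸ hm')
      simp [this]
    rw [h1, hfr m' (by simp [hm'])]
    rfl

def pvBlockStep (fam : PySem.Dict String (PySem.Set String)) (comp : List String) :
    PySem.Dict String (PySem.Set String) :=
  comp.foldl (fun fam m => fam.insert m (PySem.Set.ofList comp)) fam

-- ---------- A's outer fold in terms of the label function ----------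

theorem pvOuterA (g : PySem.Dict String (PySem.Set String)) (hnd : g.keys.Nodup)
    (hcl : pvClosed g) (hsym : ∀ x y, pvAdj g x y → pvAdj g y x)
    (lab : String → String)
    (hlab : ∀ x ∈ g.keys, ∀ y ∈ g.keys,
      (lab x = lab y ↔ Relation.EqvGen (pvAdj g) x y)) :
    ∀ (R : List String) (v : PySem.Set String)
      (fam : PySem.Dict String (PySem.Set String)) (L : List String),
    (∀ x ∈ R, x ∈ g.keys) →
    (∀ x, x ∈ v ↔ (x ∈ g.keys ∧ lab x ∈ L)) →
    (∀ x ∈ fam.keys, x ∈ v) →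
    fam = (L.map (fun b => g.keys.filter (fun x => lab x == b))).foldl pvBlockStep
      PySem.Dict.empty →
    (R.foldl
      (fun (acc : PySem.Set String × PySem.Dict String (PySem.Set String)) class_key =>
        if PySem.Set.contains acc.1 class_key then acc
        else
          let r := pvLoopA g (pvFuelA g) [class_key] acc.1 PySem.Set.empty
          let comp := g.keys.filter (fun x => PySem.Set.contains r.2 x)
          (r.1, comp.foldl (fun fam m =>
            fam.modify m PySem.Set.empty (fun s => PySem.Set.update s comp)) acc.2))
      (v, fam)).2
    = ((PySem.Set.update L (R.map lab)).map
        (fun b => g.keys.filter (fun x => lab x == b))).foldl pvBlockStep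
        PySem.Dict.empty := by
  intro R
  induction R with
  | nil =>
    intro v fam L _ _ _ hfam
    simp only [List.foldl_nil, List.map_nil, PySem.Set.update_nil]
    exact hfam
  | cons k R' ih =>
    intro v fam L hR hv hfk hfam
    simp only [List.foldl_cons, List.map_cons]
    have hkK : k ∈ g.keys := hR k (by simp)
    cases hck : PySem.Set.contains v k with
    | true =>
      rw [if_pos rfl]
      have hkL : lab k ∈ L := ((hv k).mp (pvMem_of_contains hck)).2
      rw [PySem.Set.update_cons, PySem.Set.add_of_mem hkL]
      exact ih v fam L (fun x hx => hR x (by simp [hx])) hv hfk hfam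
    | false =>
      rw [if_neg (by simp)]
      have hknv : k ∉ v := pvNotMem_of_contains hck
      have hknotL : lab k ∉ L := fun hmem => hknv ((hv k).mpr ⟨hkK, hmem⟩)
      have hsat : ∀ x ∈ v, ∀ y, pvAdj g x y → y ∈ v := by
        intro x hx y hadj
        obtain ⟨hxK, hxL⟩ := (hv x).mp hx
        have hyK : y ∈ g.keys := pvAdj_mem_right hcl hadj
        have hlabeq : lab y = lab x :=
          (hlab y hyK x hxK).mpr (Relation.EqvGen.symm _ _ (Relation.EqvGen.rel x y hadj))
        exact (hv y).mpr ⟨hyK, by rw [hlabeq]; exact hxL⟩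
      obtain ⟨R1, R2⟩ := pvComponent g hnd hcl hsym k v hsat hkK hknv
      have hcomp_eq : g.keys.filter
            (fun x => PySem.Set.contains (pvLoopA g (pvFuelA g) [k] v PySem.Set.empty).2 x)
          = g.keys.filter (fun x => lab x == lab k) := by
        apply List.filter_congr
        intro x hxK
        have h1 : PySem.Set.contains (pvLoopA g (pvFuelA g) [k] v PySem.Set.empty).2 x = true ↔
            (lab x == lab k) = true := by
          rw [PySem.Set.contains_iff, R1 x, beq_iff_eq]
          constructor
          · exact fun hpair => (hlab x hxK k hkK).mpr (Relation.EqvGen.symm _ _ hpair.2)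
          · exact fun he => ⟨hxK, Relation.EqvGen.symm _ _ ((hlab x hxK k hkK).mp he)⟩
        cases hc1 : PySem.Set.contains (pvLoopA g (pvFuelA g) [k] v PySem.Set.empty).2 x with
        | true => exact (h1.mp hc1).symm
        | false =>
          cases hc2 : (lab x == lab k) with
          | true => exact absurd (h1.mpr hc2) (by rw [hc1]; simp)
          | false => rfl
      set comp := g.keys.filter
        (fun x => PySem.Set.contains (pvLoopA g (pvFuelA g) [k] v PySem.Set.empty).2 x)
        with hcompdef
      have hcomp_mem : ∀ m ∈ comp, m ∈ g.keys ∧ lab m = lab k := by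
        intro m hm
        rw [hcomp_eq] at hm
        rw [List.mem_filter] at hm
        exact ⟨hm.1, beq_iff_eq.mp hm.2⟩
      have hfresh : ∀ m ∈ comp, fam.contains m = false := by
        intro m hm
        obtain ⟨hmK, hmlab⟩ := hcomp_mem m hm
        have hmnv : m ∉ v := fun hmem =>
          hknotL (by rw [← hmlab]; exact ((hv m).mp hmem).2)
        cases hc : fam.contains m with
        | true =>
          exact absurd (hfk m ((PySem.Dict.contains_iff_mem_keys fam m).mp hc)) hmnv
        | false => rfl
      have hndcomp : comp.Nodup := hnd.filter _
      rw [pvFamStep comp comp fam hfresh hndcomp]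
      have hv1 : ∀ x, x ∈ (pvLoopA g (pvFuelA g) [k] v PySem.Set.empty).1 ↔
          (x ∈ g.keys ∧ lab x ∈ L ++ [lab k]) := by
        intro x
        rw [R2 x, hv x, R1 x, List.mem_append, List.mem_singleton]
        constructor
        · rintro (⟨hxK, hxL⟩ | ⟨hxK, hconn⟩)
          · exact ⟨hxK, Or.inl hxL⟩
          · exact ⟨hxK, Or.inr ((hlab x hxK k hkK).mpr (Relation.EqvGen.symm _ _ hconn))⟩
        · rintro ⟨hxK, hxL | hxL⟩
          · exact Or.inl ⟨hxK, hxL⟩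
          · exact Or.inr ⟨hxK, Relation.EqvGen.symm _ _ ((hlab x hxK k hkK).mp hxL)⟩
      have hfk1 : ∀ x ∈ (comp.foldl (fun fam m =>
          fam.insert m (PySem.Set.ofList comp)) fam).keys,
          x ∈ (pvLoopA g (pvFuelA g) [k] v PySem.Set.empty).1 := by
        intro x hx
        rw [PySem.Dict.keys_foldl_insert] at hx
        rcases (PySem.Set.mem_update fam.keys comp x).mp hx with hx | hx
        · exact (R2 x).mpr (Or.inl (hfk x hx))
        · refine (R2 x).mpr (Or.inr ?_)
          rw [hcompdef, List.mem_filter] at hx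
          exact pvMem_of_contains hx.2
      have hfam1 : comp.foldl (fun fam m => fam.insert m (PySem.Set.ofList comp)) fam
          = ((L ++ [lab k]).map (fun b => g.keys.filter (fun x => lab x == b))).foldl
              pvBlockStep PySem.Dict.empty := by
        rw [List.map_append, List.foldl_append, ← hfam]
        simp only [List.map_cons, List.map_nil, List.foldl_cons, List.foldl_nil]
        rw [← hcomp_eq]
        rfl
      rw [PySem.Set.update_cons, PySem.Set.add_of_not_mem hknotL]
      exact ih (pvLoopA g (pvFuelA g) [k] v PySem.Set.empty).1 _ (L ++ [lab k])
        (fun x hx => hR x (by simp [hx])) hv1 hfk1 hfam1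

-- ---------- B's grouping fold: closed form ----------

theorem pvGroup_items (f : String → String) (K : List String) :
    (K.foldl (fun (gr : PySem.Dict String (List String)) k =>
        gr.modify (f k) [] (fun ms => ms ++ [k])) PySem.Dict.empty).items
    = (PySem.Set.ofList (K.map f)).map (fun b => (b, K.filter (fun x => f x == b))) := by
  induction K using List.reverseRecOn with
  | nil => rfl
  | append_singleton K k ih =>
    rw [List.foldl_append, List.foldl_cons, List.foldl_nil]
    set G := K.foldl (fun (gr : PySem.Dict String (List String)) k =>
        gr.modify (f k) [] (fun ms => ms ++ [k])) PySem.Dict.empty with hGdef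
    have hkeysG : G.keys = PySem.Set.ofList (K.map f) := by
      show (G.items).map (·.1) = PySem.Set.ofList (K.map f)
      rw [ih, List.map_map]
      exact (List.map_congr_left (fun b _ => rfl)).trans (List.map_id _)
    have hndG : G.keys.Nodup := by rw [hkeysG]; exact PySem.Set.nodup_ofList _
    have hmodins : G.modify (f k) [] (fun ms => ms ++ [k])
        = G.insert (f k) (G.getD (f k) [] ++ [k]) := rfl
    rw [hmodins]
    by_cases hmem : f k ∈ K.map f
    · -- the label was seen before: its block grows in place
      have hmemset : f k ∈ PySem.Set.ofList (K.map f) := (PySem.Set.mem_ofList _ _).mpr hmem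
      have hcont : G.contains (f k) = true :=
        (PySem.Dict.contains_iff_mem_keys G (f k)).mpr (by rw [hkeysG]; exact hmemset)
      have hitem : (f k, K.filter (fun x => f x == f k)) ∈ G.items := by
        rw [ih]
        exact List.mem_map.mpr ⟨f k, hmemset, rfl⟩
      have hgetD : G.getD (f k) [] = K.filter (fun x => f x == f k) :=
        PySem.Dict.getD_of_mem_items G hitem hndG []
      rw [PySem.Dict.items_insert_of_contains G _ hcont, ih, List.map_map]
      have hofl : PySem.Set.ofList ((K ++ [k]).map f) = PySem.Set.ofList (K.map f) := by
        rw [List.map_append, List.map_singleton, PySem.Set.ofList_append_singleton,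
          PySem.Set.add_of_mem hmemset]
      rw [hofl]
      apply List.map_congr_left
      intro b hb
      simp only [Function.comp_apply]
      by_cases hbk : b = f k
      · rw [hbk, if_pos (by simp), hgetD, List.filter_append]
        have hfilk : [k].filter (fun x => f x == f k) = [k] := by simp
        rw [hfilk]
      · rw [if_neg (by simp [hbk]), List.filter_append]
        have hfilk : [k].filter (fun x => f x == b) = [] := by
          have hkb : (f k == b) = false := by
            rw [beq_eq_false_iff_ne]
            exact fun he => hbk he.symm
          simp [hkb]
        rw [hfilk, List.append_nil]
    · -- a brand new label: a new singleton block is appended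
      have hmemset : f k ∉ PySem.Set.ofList (K.map f) :=
        fun hc => hmem ((PySem.Set.mem_ofList _ _).mp hc)
      have hcont : G.contains (f k) = false := by
        cases hc : G.contains (f k) with
        | true =>
          exact absurd ((PySem.Dict.contains_iff_mem_keys G (f k)).mp hc)
            (by rw [hkeysG]; exact hmemset)
        | false => rfl
      rw [PySem.Dict.items_insert_of_not_contains G _ hcont,
        PySem.Dict.getD_of_not_contains G [] hcont, ih]
      have hofl : PySem.Set.ofList ((K ++ [k]).map f)
          = PySem.Set.ofList (K.map f) ++ [f k] := by
        rw [List.map_append, List.map_singleton, PySem.Set.ofList_append_singleton,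
          PySem.Set.add_of_not_mem hmemset]
      rw [hofl, List.map_append, List.map_singleton]
      congr 1
      · apply List.map_congr_left
        intro b hb
        have hbk : ¬ b = f k := fun he => hmemset (he ▸ hb)
        rw [List.filter_append]
        have hfilk : [k].filter (fun x => f x == b) = [] := by
          have hkb : (f k == b) = false := by
            rw [beq_eq_false_iff_ne]
            exact fun he => hbk he.symm
          simp [hkb]
        rw [hfilk, List.append_nil]
      · have hfilK : K.filter (fun x => f x == f k) = [] := by
          rw [List.filter_eq_nil_iff]
          intro x hx hfx
          exact hmem (List.mem_map.mpr ⟨x, hx, beq_iff_eq.mp hfx⟩)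
        rw [List.filter_append, hfilK, List.nil_append]
        have hfilk : [k].filter (fun x => f x == f k) = [k] := by simp
        rw [hfilk]
        simp

-- ===== VERDICT (by name: the statement is the Claim_ definition above) =====
theorem collect_family_classes_py_spec : Claim_equal_collect_family_classes_py := by
  intro l _
  unfold Spec_collect_family_classes_py
  show collect_family_classes_py l = collect_family_classes_py_alt l
  obtain ⟨hkeq, hW, hsym, hlk, hidem, hfib⟩ := pvLink_main l
  have hnd : (pvGraphA l).keys.Nodup := hW.1
  have hndd : (pvLabels l).keys.Nodup := by rw [← hkeq]; exact hnd
  have hlab : ∀ x ∈ (pvGraphA l).keys, ∀ y ∈ (pvGraphA l).keys,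
      ((pvLabels l).getD x "" = (pvLabels l).getD y "" ↔
        Relation.EqvGen (pvAdj (pvGraphA l)) x y) := by
    intro x hx y hy
    exact hfib x (by rw [← hkeq]; exact hx) y (by rw [← hkeq]; exact hy)
  -- A's side: the outer fold in terms of the final labels
  have hA := pvOuterA (pvGraphA l) hnd hW.2 hsym (fun x => (pvLabels l).getD x "") hlab
    (pvGraphA l).keys PySem.Set.empty PySem.Dict.empty []
    (fun x hx => hx)
    (by intro x; simp [PySem.Set.empty])
    (by intro x hx; rw [PySem.Dict.keys_empty] at hx; cases hx)
    rfl
  -- B's side: the grouping fold in closed form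
  have hitems : (pvLabels l).items
      = (pvLabels l).keys.map (fun k => (k, (pvLabels l).getD k "")) :=
    PySem.Dict.items_eq_map_keys (pvLabels l) hndd ""
  have hBgroups : ((pvLabels l).items.foldl
      (fun (gr : PySem.Dict String (List String)) p =>
        gr.modify p.2 [] (fun ms => ms ++ [p.1])) PySem.Dict.empty).items
      = (PySem.Set.ofList ((pvLabels l).keys.map (fun k => (pvLabels l).getD k ""))).map
          (fun b => (b, (pvLabels l).keys.filter (fun x => (pvLabels l).getD x "" == b))) := by
    rw [hitems, List.foldl_map]
    exact pvGroup_items (fun k => (pvLabels l).getD k "") (pvLabels l).keys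
  show (((pvGraphA l).keys.foldl _ (PySem.Set.empty, PySem.Dict.empty)).2).items = _
  rw [hA]
  show _ = (((pvLabels l).items.foldl
      (fun (gr : PySem.Dict String (List String)) p =>
        gr.modify p.2 [] (fun ms => ms ++ [p.1])) PySem.Dict.empty).values.foldl
        (fun fam members =>
          members.foldl (fun fam m => fam.insert m (PySem.Set.ofList members)) fam)
        PySem.Dict.empty).items
  have hvalues : ((pvLabels l).items.foldl
      (fun (gr : PySem.Dict String (List String)) p =>
        gr.modify p.2 [] (fun ms => ms ++ [p.1])) PySem.Dict.empty).values
      = (PySem.Set.ofList ((pvLabels l).keys.map (fun k => (pvLabels l).getD k ""))).map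
          (fun b => (pvLabels l).keys.filter (fun x => (pvLabels l).getD x "" == b)) := by
    show ((pvLabels l).items.foldl
      (fun (gr : PySem.Dict String (List String)) p =>
        gr.modify p.2 [] (fun ms => ms ++ [p.1])) PySem.Dict.empty).items.map (·.2) = _
    rw [hBgroups, List.map_map]
    rfl
  rw [hvalues, PySem.Set.update_nil_left, hkeq]
  rfl
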